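-- pv_equiv track=rewrite | github.com/warrenzhu25/spark | convert_folder_to_epub.py | remove_imports
-- ===== SOURCE A (Python) =====
-- def remove_imports(content):
--     """Remove import statements from Scala/Java code."""
--     lines = content.split('\n')
--     result = []
--     in_imports = False
--
--     for line in lines:
--         stripped = line.strip()
--
--         # Skip import statements
--         if stripped.startswith('import '):
--             in_imports = True
--             continue
--         elif in_imports and not stripped:
--             # Skip blank lines after imports
--             in_imports = False
--             continue
--         elif in_imports and stripped.startswith('import '):
--             continue
--         else:
--             in_imports = False
--             result.append(line)
--
--     return '\n'.join(result)
-- ===== SOURCE B (Python) =====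
-- def remove_imports(content):
--     """Remove import statements from Scala/Java code."""
--     lines = content.split('\n')
--     prevs = [''] + lines[:-1]
--     kept = [line for prev, line in zip(prevs, lines)
--             if not line.strip().startswith('import ')
--             and not (not line.strip() and prev.strip().startswith('import '))]
--     return '\n'.join(kept)
-- ===== Notes on version B (the rewrite author's own statement) =====
-- stated objective: simpler
-- what changed: Replaces A's stateful loop with a carried in_imports flag by a stateless filter: each line is zipped with its predecessor ([''] + lines[:-1]) and kept unless it is an import line or a blank line whose predecessor is an import line.
import Mathlib
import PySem

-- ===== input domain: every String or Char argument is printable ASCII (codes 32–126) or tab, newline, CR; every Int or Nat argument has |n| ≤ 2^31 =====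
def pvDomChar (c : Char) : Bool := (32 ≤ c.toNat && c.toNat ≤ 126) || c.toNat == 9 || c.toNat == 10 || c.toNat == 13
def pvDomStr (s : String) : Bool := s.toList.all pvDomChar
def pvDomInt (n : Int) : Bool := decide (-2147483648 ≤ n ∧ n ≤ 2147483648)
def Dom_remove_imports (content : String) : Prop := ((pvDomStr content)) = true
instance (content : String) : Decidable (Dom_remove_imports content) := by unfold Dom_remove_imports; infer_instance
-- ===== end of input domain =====

-- B replaces A's carried `in_imports` flag by a stateless filter that pairs each
-- line with its predecessor (zip with the shifted list); objective: simpler.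

-- ===== PORT A =====
-- A's loop: carries the `in_imports` flag and an accumulating result list.
def pvALoop : List String → Bool → List String
  | [], _ => []
  | line :: rest, inImports =>
    let stripped := PySem.Str.strip line
    if PySem.Str.startswith stripped "import " then
      pvALoop rest true
    else if inImports && (stripped == "") then
      pvALoop rest false
    else if inImports && PySem.Str.startswith stripped "import " then
      pvALoop rest inImports
    else
      line :: pvALoop rest false

def remove_imports (content : String) : String :=
  let lines := (PySem.Str.split? content "\n").getD []
  PySem.Str.join "\n" (pvALoop lines false)

-- ===== PORT B =====
-- B: prevs = [''] + lines[:-1]; keep a line unless it is an import line, or it is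
-- blank and its predecessor is an import line.
def pvKeep (p : String × String) : Bool :=
  !(PySem.Str.startswith (PySem.Str.strip p.2) "import ") &&
  !((PySem.Str.strip p.2 == "") && PySem.Str.startswith (PySem.Str.strip p.1) "import ")

def remove_imports_alt (content : String) : String :=
  let lines := (PySem.Str.split? content "\n").getD []
  let prevs := "" :: PySem.List.slice lines none (some (-1))
  let kept := ((prevs.zip lines).filter pvKeep).map Prod.snd
  PySem.Str.join "\n" kept

-- ===== PRECONDITION & SPEC =====
def Spec_remove_imports (content : String) (out : String) : Prop := out = remove_imports_alt content
instance (content : String) (out : String) : Decidable (Spec_remove_imports content out) := by unfold Spec_remove_imports; infer_instance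

-- ===== CLAIM (what is proved, stated in full; the proofs are below) =====
def Claim_equal_remove_imports : Prop := ∀ (content : String), Dom_remove_imports content → Spec_remove_imports content (remove_imports content)

-- ===== LEMMAS AND PROOFS =====

-- zipping with the predecessor list: the trailing element dropped by [:-1] never
-- gets paired, so it may as well stay.
theorem pv_zip_dropLast {α : Type} (p : α) (xs : List α) :
    (p :: xs.dropLast).zip xs = (p :: xs).zip xs := by
  induction xs generalizing p with
  | nil => rfl
  | cons y rest ih =>
    cases rest with
    | nil => rfl
    | cons z rest' =>
      simp only [List.dropLast_cons_of_ne_nil (List.cons_ne_nil z rest'), List.zip_cons_cons]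
      exact congrArg _ (ih y)

theorem pvKeep_mk (p l : String) :
    pvKeep (p, l) = (!(PySem.Str.startswith (PySem.Str.strip l) "import ") &&
      !((PySem.Str.strip l == "") && PySem.Str.startswith (PySem.Str.strip p) "import ")) := rfl

-- A's flag at each step equals "the previous raw line's stripped form starts with 'import '".
theorem pv_loop_eq (lines : List String) (prev : String) :
    pvALoop lines (PySem.Str.startswith (PySem.Str.strip prev) "import ") =
      (((prev :: lines).zip lines).filter pvKeep).map Prod.snd := by
  induction lines generalizing prev with
  | nil => rfl
  | cons line rest ih =>
    have H := ih line
    rw [List.zip_cons_cons, List.filter_cons, pvKeep_mk]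
    cases h1 : PySem.Str.startswith (PySem.Str.strip line) "import " <;>
      cases hb : PySem.Str.startswith (PySem.Str.strip prev) "import " <;>
        cases h2 : (PySem.Str.strip line == "") <;>
          rw [h1] at H <;>
            simp only [pvALoop, h1, hb, h2, Bool.and_true, Bool.and_false, Bool.true_and,
              Bool.false_and, Bool.not_true, Bool.not_false, Bool.false_eq_true,
              if_true, if_false, List.map_cons] <;>
          rw [H]

-- ===== VERDICT (by name: the statement is the Claim_ definition above) =====
theorem remove_imports_spec : Claim_equal_remove_imports := by
  intro content _
  unfold Spec_remove_imports remove_imports remove_imports_alt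
  simp only [PySem.List.slice_to_neg_one]
  congr 1
  rw [pv_zip_dropLast, ← pv_loop_eq]
  rfl
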